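-- pv_equiv track=rewrite | github.com/DarKoul-Wmg/AMS-AWS-1 | MP03 Programación/UF2_Python dineño modular/Python (UF2)/funcionsPDF/ex3EntrarParaulesFinsAParaula_Fi.py | buscar_repetidas
-- ===== SOURCE A (Python) =====
-- def buscar_repetidas(palabras):
--     palabras_set = set()
--     for palabra in palabras:
--         palabra_lower = palabra.lower()
--         if palabra_lower == 'fi':
--             return False
--         if palabra_lower in palabras_set:
--             return True
--         palabras_set.add(palabra_lower)
--     return False
-- ===== SOURCE B (Python) =====
-- def buscar_repetidas(palabras):
--     lows = [p.lower() for p in palabras]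
--     if 'fi' in lows:
--         lows = lows[:lows.index('fi')]
--     return len(set(lows)) != len(lows)
-- ===== Notes on version B (the rewrite author's own statement) =====
-- stated objective: simpler
-- what changed: Replaces the single-pass check-then-add loop over a growing seen-set with a truncate-at-'fi' prefix followed by one bulk duplicate test len(set(prefix)) != len(prefix).
import Mathlib
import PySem

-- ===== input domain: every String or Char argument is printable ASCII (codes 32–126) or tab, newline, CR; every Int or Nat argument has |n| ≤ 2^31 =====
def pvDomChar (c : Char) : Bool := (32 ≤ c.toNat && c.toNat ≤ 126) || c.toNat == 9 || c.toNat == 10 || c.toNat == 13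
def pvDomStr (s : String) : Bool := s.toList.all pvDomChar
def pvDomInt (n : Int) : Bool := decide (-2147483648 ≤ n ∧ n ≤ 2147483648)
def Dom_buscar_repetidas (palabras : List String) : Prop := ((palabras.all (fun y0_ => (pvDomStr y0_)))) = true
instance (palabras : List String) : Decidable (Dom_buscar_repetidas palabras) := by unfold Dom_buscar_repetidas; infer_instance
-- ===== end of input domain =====

-- B replaces A's single-pass check-then-add loop (growing seen-set, early return) with a
-- truncate-at-'fi' prefix followed by one bulk duplicate test len(set(prefix)) != len(prefix); objective: simpler.


-- ===== PORT A =====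
-- the for-loop with its growing set 'palabras_set' and the two early returns
def buscarLoopA (palabras : List String) (seen : PySem.Set String) : Bool :=
  match palabras with
  | [] => false
  | palabra :: rest =>
    let palabra_lower := PySem.Str.lower palabra
    if palabra_lower == "fi" then false
    else if PySem.Set.contains seen palabra_lower then true
    else buscarLoopA rest (PySem.Set.add seen palabra_lower)

def buscar_repetidas (palabras : List String) : Bool :=
  buscarLoopA palabras PySem.Set.empty

-- ===== PORT B =====
def buscar_repetidas_alt (palabras : List String) : Bool :=
  let lows := palabras.map PySem.Str.lower
  let lows2 :=
    if lows.contains "fi" then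
      PySem.List.slice lows none (some (((PySem.List.index? lows "fi").getD 0 : Nat) : Int))
    else lows
  decide (PySem.Set.len (PySem.Set.ofList lows2) ≠ PySem.List.len lows2)

-- ===== PRECONDITION & SPEC =====
def Spec_buscar_repetidas (palabras : List String) (out : Bool) : Prop := out = buscar_repetidas_alt palabras
instance (palabras : List String) (out : Bool) : Decidable (Spec_buscar_repetidas palabras out) := by unfold Spec_buscar_repetidas; infer_instance

-- ===== CLAIM (what is proved, stated in full; the proofs are below) =====
def Claim_equal_buscar_repetidas : Prop := ∀ (palabras : List String), Dom_buscar_repetidas palabras → Spec_buscar_repetidas palabras (buscar_repetidas palabras)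

-- ===== LEMMAS AND PROOFS =====

-- B's truncation (index + slice, guarded by membership) is the takeWhile-prefix before the first "fi"
theorem truncate_eq_takeWhile (lows : List String) :
    (if lows.contains "fi" then
        PySem.List.slice lows none (some (((PySem.List.index? lows "fi").getD 0 : Nat) : Int))
      else lows)
    = lows.takeWhile (fun x => !(x == "fi")) := by
  induction lows with
  | nil => simp
  | cons x rest ih =>
    by_cases hx : x = "fi"
    · subst hx
      rw [PySem.List.index?_cons_self]
      rw [show (some ((((some 0).getD 0 : Nat)) : Int)) = some (((0:Nat)):Int) from rfl,
        PySem.List.slice_to_natCast]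
      simp
    · rw [PySem.List.index?_cons_of_ne rest hx]
      by_cases hr : "fi" ∈ rest
      · obtain ⟨i, hi⟩ := Option.isSome_iff_exists.mp ((PySem.List.index?_isSome_iff rest "fi").mpr hr)
        rw [hi] at ih
        have ih' : List.take i rest = List.takeWhile (fun y => !(y == "fi")) rest := by
          simpa [List.contains_eq_mem, hr, PySem.List.slice_to_natCast] using ih
        have hpx : (!(x == "fi")) = true := by simpa using hx
        rw [hi]
        simp only [List.contains_eq_mem, List.mem_cons, hr, or_true, decide_true, if_true,
          Option.map_some, Option.getD_some, List.takeWhile_cons, hpx]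
        rw [show (some ((i + 1 : Nat) : Int)) = some (((i+1:Nat)):Int) from rfl,
          PySem.List.slice_to_natCast]
        simp [List.take_succ_cons, ih']
      · have hc : (x :: rest).contains "fi" = false := by
          simp [List.contains_eq_mem, hx, hr, eq_comm]
        rw [hc]
        have ih' : rest = List.takeWhile (fun y => !(y == "fi")) rest := by
          simpa [List.contains_eq_mem, hr] using ih
        have hpx : (!(x == "fi")) = true := by simpa using hx
        simp only [Bool.false_eq_true, if_false, List.takeWhile_cons, hpx, if_true]
        exact congrArg (x :: ·) ih'

-- len(set(xs)) != len(xs) is exactly "xs has a duplicate"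
theorem dupCheck_eq_not_nodup (xs : List String) :
    decide (PySem.Set.len (PySem.Set.ofList xs) ≠ PySem.List.len xs) = decide (¬ xs.Nodup) := by
  have hperm : (PySem.Set.ofList xs).length = xs.dedup.length := by
    refine List.Perm.length_eq ?_
    rw [List.perm_ext_iff_of_nodup (PySem.Set.nodup_ofList xs) xs.nodup_dedup]
    intro a; rw [PySem.Set.mem_ofList, List.mem_dedup]
  have hiff : xs.dedup.length = xs.length ↔ xs.Nodup := by
    constructor
    · intro h
      exact List.dedup_eq_self.mp ((List.dedup_sublist xs).eq_of_length h)
    · intro h; rw [List.dedup_eq_self.mpr h]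
  apply decide_eq_decide.mpr
  simp only [PySem.Set.len, PySem.List.len_eq, hperm]
  rw [not_iff_not.symm] at hiff
  rw [← hiff]
  exact_mod_cast Iff.rfl

-- A's loop with seen-set s equals: some prefix word already in s, or a duplicate inside the prefix
theorem loopA_characterization (ws : List String) (s : PySem.Set String) :
    buscarLoopA ws s
      = decide ((∃ x ∈ (ws.map PySem.Str.lower).takeWhile (fun x => !(x == "fi")), x ∈ s)
                ∨ ¬ ((ws.map PySem.Str.lower).takeWhile (fun x => !(x == "fi"))).Nodup) := by
  induction ws generalizing s with
  | nil => simp [buscarLoopA]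
  | cons p rest ih =>
    rw [buscarLoopA]
    by_cases hl : PySem.Str.lower p = "fi"
    · simp [hl]
    · have hpx : (!(PySem.Str.lower p == "fi")) = true := by simpa using hl
      simp only [List.map_cons, List.takeWhile_cons, hpx, if_true, beq_iff_eq, hl, if_false]
      by_cases hm : PySem.Str.lower p ∈ s
      · have : PySem.Set.contains s (PySem.Str.lower p) = true := by
          simpa [PySem.Set.contains] using hm
        rw [this]
        simp only [if_true]
        symm
        simp only [decide_eq_true_eq]
        exact Or.inl ⟨PySem.Str.lower p, List.mem_cons_self, hm⟩
      · have : PySem.Set.contains s (PySem.Str.lower p) = false := by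
          simpa [PySem.Set.contains] using hm
        rw [this]
        rw [if_neg (by simp)]
        rw [ih]
        apply decide_eq_decide.mpr
        simp only [PySem.Set.mem_add, List.mem_cons, List.nodup_cons]
        constructor
        · rintro (⟨x, hx, hxs | hxl⟩ | hnd)
          · exact Or.inl ⟨x, Or.inr hx, hxs⟩
          · subst hxl
            exact Or.inr (fun hand => hand.1 hx)
          · exact Or.inr (fun hand => hnd hand.2)
        · rintro (⟨x, hx | hx, hxs⟩ | hnd)
          · subst hx; exact absurd hxs hm
          · exact Or.inl ⟨x, hx, Or.inl hxs⟩
          · rcases not_and_or.mp hnd with h | h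
            · push Not at h; exact Or.inl ⟨PySem.Str.lower p, h, Or.inr rfl⟩
            · tauto

-- ===== VERDICT (by name: the statement is the Claim_ definition above) =====
theorem buscar_repetidas_spec : Claim_equal_buscar_repetidas := by
  intro palabras _
  unfold Spec_buscar_repetidas buscar_repetidas
  simp only [buscar_repetidas_alt]
  rw [truncate_eq_takeWhile, dupCheck_eq_not_nodup, loopA_characterization]
  apply decide_eq_decide.mpr
  simp
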